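-- pv_equiv track=rewrite | github.com/AngelTseng/PPT_AI_TOOL | spec_validator.py | check_slide_diversity
-- ===== SOURCE A (Python) =====
-- def check_slide_diversity(spec: dict):
--     warnings = []
--     slides = spec.get("slides", [])
--
--     types = [s.get("type") for s in slides if s.get("type") not in ("cover", "end")]
--     unique_types = set(types)
--
--     if len(slides) >= 5 and len(unique_types) < 3:
--         warnings.append("Deck uses fewer than 3 distinct slide types; may look monotonous.")
--
--     streak = 1
--     for i in range(1, len(types)):
--         if types[i] == types[i - 1]:
--             streak += 1
--             if streak >= 3:
--                 warnings.append(f"Slide type '{types[i]}' repeats 3 or more times in a row.")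
--                 break
--         else:
--             streak = 1
--
--     return warnings
-- ===== SOURCE B (Python) =====
-- def check_slide_diversity(spec: dict):
--     warnings = []
--     slides = spec.get("slides", [])
--
--     types = [s.get("type") for s in slides if s.get("type") not in ("cover", "end")]
--
--     if len(slides) >= 5 and len(set(types)) < 3:
--         warnings.append("Deck uses fewer than 3 distinct slide types; may look monotonous.")
--
--     # Materialize the consecutive runs of equal types, then warn on the first run of length >= 3.
--     runs = []
--     for t in types:
--         if runs and runs[-1][0] == t:
--             runs[-1][1] += 1
--         else:
--             runs.append([t, 1])
--     for key, count in runs: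
--         if count >= 3:
--             warnings.append(f"Slide type '{key}' repeats 3 or more times in a row.")
--             break
--
--     return warnings
-- ===== Notes on version B (the rewrite author's own statement) =====
-- stated objective: alternative
-- what changed: A threads a rolling streak counter through an index loop with a break; B first materializes the list of consecutive (type, run-length) runs in one pass and then warns on the first run of length >= 3.
import Mathlib
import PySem

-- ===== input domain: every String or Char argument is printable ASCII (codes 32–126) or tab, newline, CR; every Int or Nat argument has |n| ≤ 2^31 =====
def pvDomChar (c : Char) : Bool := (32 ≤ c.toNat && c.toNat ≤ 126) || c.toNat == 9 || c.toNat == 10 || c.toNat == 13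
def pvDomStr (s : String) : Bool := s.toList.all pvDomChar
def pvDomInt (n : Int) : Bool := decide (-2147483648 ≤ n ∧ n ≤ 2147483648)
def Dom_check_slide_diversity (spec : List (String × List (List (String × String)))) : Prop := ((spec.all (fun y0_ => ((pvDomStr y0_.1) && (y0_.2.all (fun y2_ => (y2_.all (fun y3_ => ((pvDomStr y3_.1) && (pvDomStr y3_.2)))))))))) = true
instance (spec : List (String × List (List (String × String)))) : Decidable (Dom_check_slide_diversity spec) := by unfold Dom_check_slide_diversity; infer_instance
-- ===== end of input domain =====

-- B replaces A's rolling streak counter (with break) by materializing the consecutive runs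
-- and warning on the first run of length >= 3; same cost, different decomposition (objective: alternative).

-- ===== PORT A =====

-- dict lookup d.get(k) = first match in the association list (exact for Python dicts, whose keys are unique)
def pvGet? {α : Type} (d : List (String × α)) (k : String) : Option α :=
  (d.find? (fun p => p.1 == k)).map (fun p => p.2)

-- f-string rendering of a slide "type" (a str, or None when the key is absent)
def pvShowType (t : Option String) : String :=
  match t with
  | none => "None"
  | some s => s

def pvRepeatMsg (t : Option String) : String :=
  "Slide type '" ++ pvShowType t ++ "' repeats 3 or more times in a row."

-- [s.get("type") for s in slides if s.get("type") not in ("cover", "end")]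
def pvTypes (slides : List (List (String × String))) : List (Option String) :=
  (slides.map (fun s => pvGet? s "type")).filter
    (fun t => !(t == some "cover" || t == some "end"))

-- A's streak loop: compares types[i] with types[i-1], threading the rolling streak; break = return
def pvStreakLoopA (prev : Option String) (rest : List (Option String)) (streak : Int) : List String :=
  match rest with
  | [] => []
  | t :: ts =>
    if t == prev then
      if streak + 1 ≥ 3 then [pvRepeatMsg t]
      else pvStreakLoopA t ts (streak + 1)
    else
      pvStreakLoopA t ts 1

def check_slide_diversity (spec : List (String × List (List (String × String)))) : List String :=
  let slides := (pvGet? spec "slides").getD []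
  let types := pvTypes slides
  let unique_types := PySem.Set.ofList types
  let warnings :=
    if slides.length ≥ 5 ∧ unique_types.length < 3 then
      ["Deck uses fewer than 3 distinct slide types; may look monotonous."]
    else []
  warnings ++
    (match types with
     | [] => []                       -- range(1, len(types)) is empty
     | t :: rest => pvStreakLoopA t rest 1)

-- ===== PORT B =====

-- one step of B's run-building loop: extend the last run or open a new one
def pvStepB (runs : List (Option String × Nat)) (t : Option String) : List (Option String × Nat) :=
  match runs.getLast? with
  | some (k, c) => if k == t then runs.dropLast ++ [(k, c + 1)] else runs ++ [(t, 1)]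
  | none => [(t, 1)]

-- B's first pass: the list of consecutive runs [(key, count), ...], built front to back
def pvRunsB (types : List (Option String)) : List (Option String × Nat) :=
  types.foldl pvStepB []

def check_slide_diversity_alt (spec : List (String × List (List (String × String)))) : List String :=
  let slides := (pvGet? spec "slides").getD []
  let types := pvTypes slides
  let warnings :=
    if slides.length ≥ 5 ∧ (PySem.Set.ofList types).length < 3 then
      ["Deck uses fewer than 3 distinct slide types; may look monotonous."]
    else []
  warnings ++
    (match (pvRunsB types).find? (fun r => 3 ≤ r.2) with
     | some (k, _) => [pvRepeatMsg k]
     | none => [])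

-- ===== PRECONDITION & SPEC =====
def Spec_check_slide_diversity (spec : List (String × List (List (String × String)))) (out : List String) : Prop := out = check_slide_diversity_alt spec
instance (spec : List (String × List (List (String × String)))) (out : List String) : Decidable (Spec_check_slide_diversity spec out) := by unfold Spec_check_slide_diversity; infer_instance

-- ===== CLAIM (what is proved, stated in full; the proofs are below) =====
def Claim_equal_check_slide_diversity : Prop := ∀ (spec : List (String × List (List (String × String)))), Dom_check_slide_diversity spec → Spec_check_slide_diversity spec (check_slide_diversity spec)

-- ===== LEMMAS AND PROOFS =====

-- reference run-builder: structural recursion from the front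
def pvConsRun (k : Option String) (c : Nat) (rs : List (Option String × Nat)) : List (Option String × Nat) :=
  match rs with
  | [] => [(k, c)]
  | (k', c') :: rs' => if k == k' then (k, c + c') :: rs' else (k, c) :: rs

def pvRunsRec : List (Option String) → List (Option String × Nat)
  | [] => []
  | t :: ts => pvConsRun t 1 (pvRunsRec ts)

def pvWarnOf (rs : List (Option String × Nat)) : List String :=
  match rs.find? (fun r => 3 ≤ r.2) with
  | some (k, _) => [pvRepeatMsg k]
  | none => []

lemma pvConsRun_head (k : Option String) (c : Nat) (rs : List (Option String × Nat)) :
    ∃ c' rs', pvConsRun k c rs = (k, c') :: rs' ∧ c ≤ c' := by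
  cases rs with
  | nil => exact ⟨c, [], rfl, le_refl _⟩
  | cons p rs' =>
    obtain ⟨k', c'⟩ := p
    by_cases h : k == k'
    · exact ⟨c + c', rs', by simp [pvConsRun, h], Nat.le_add_right _ _⟩
    · exact ⟨c, (k', c') :: rs', by simp [pvConsRun, h], le_refl _⟩

lemma pvConsRun_consRun (k : Option String) (c : Nat) (rs : List (Option String × Nat)) :
    pvConsRun k c (pvConsRun k 1 rs) = pvConsRun k (c + 1) rs := by
  cases rs with
  | nil => simp [pvConsRun]
  | cons p rs' =>
    obtain ⟨k', c'⟩ := p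
    by_cases h : k == k'
    · simp [pvConsRun, h]; omega
    · simp [pvConsRun, h]

lemma pvStepB_concat (acc : List (Option String × Nat)) (k : Option String) (c : Nat)
    (t : Option String) :
    pvStepB (acc ++ [(k, c)]) t =
      if k == t then acc ++ [(k, c + 1)] else (acc ++ [(k, c)]) ++ [(t, 1)] := by
  simp [pvStepB]

-- B's foldl with a nonempty accumulator ending in run (k, c)
lemma pvRunsB_invariant (ts : List (Option String)) :
    ∀ (acc : List (Option String × Nat)) (k : Option String) (c : Nat),
      List.foldl pvStepB (acc ++ [(k, c)]) ts = acc ++ pvConsRun k c (pvRunsRec ts) := by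
  induction ts with
  | nil => intro acc k c; simp [pvRunsRec, pvConsRun]
  | cons t ts ih =>
    intro acc k c
    rw [List.foldl_cons, pvStepB_concat]
    by_cases h : k == t
    · have hk : k = t := by simpa using h
      rw [if_pos h, ih acc k (c + 1)]
      subst hk
      rw [show pvRunsRec (k :: ts) = pvConsRun k 1 (pvRunsRec ts) from rfl,
        pvConsRun_consRun]
    · rw [if_neg h, ih (acc ++ [(k, c)]) t 1, List.append_assoc]
      rw [show pvRunsRec (t :: ts) = pvConsRun t 1 (pvRunsRec ts) from rfl]
      obtain ⟨c', rs', heq, -⟩ := pvConsRun_head t 1 (pvRunsRec ts)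
      rw [heq]
      simp [pvConsRun, h]

lemma pvRunsB_eq (ts : List (Option String)) : pvRunsB ts = pvRunsRec ts := by
  cases ts with
  | nil => rfl
  | cons t ts =>
    show List.foldl pvStepB (pvStepB [] t) ts = _
    rw [show pvStepB [] t = [] ++ [(t, 1)] from rfl, pvRunsB_invariant ts [] t 1]
    rfl

lemma pvWarnOf_consRun_big (k : Option String) (c : Nat) (rs : List (Option String × Nat))
    (h : 3 ≤ c) : pvWarnOf (pvConsRun k c rs) = [pvRepeatMsg k] := by
  obtain ⟨c', rs', heq, hle⟩ := pvConsRun_head k c rs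
  simp [pvWarnOf, heq, show (3 ≤ c') from le_trans h hle]

-- A's rolling-streak loop computes the warning of the first long run, for streak ∈ {1, 2}
lemma pvStreakLoopA_cons (prev t : Option String) (ts : List (Option String)) (streak : Int) :
    pvStreakLoopA prev (t :: ts) streak =
      if t == prev then
        (if streak + 1 ≥ 3 then [pvRepeatMsg t] else pvStreakLoopA t ts (streak + 1))
      else pvStreakLoopA t ts 1 := rfl

lemma pvStreakLoopA_eq (rest : List (Option String)) :
    ∀ (prev : Option String) (streak : Int), 1 ≤ streak → streak ≤ 2 →
      pvStreakLoopA prev rest streak = pvWarnOf (pvConsRun prev streak.toNat (pvRunsRec rest)) := by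
  induction rest with
  | nil =>
    intro prev streak h1 h2
    have h3 : ¬ (3 ≤ streak.toNat) := by omega
    simp [pvStreakLoopA, pvRunsRec, pvConsRun, pvWarnOf, h3]
  | cons t ts ih =>
    intro prev streak h1 h2
    rw [show pvRunsRec (t :: ts) = pvConsRun t 1 (pvRunsRec ts) from rfl]
    by_cases h : t == prev
    · have ht : t = prev := by simpa using h
      subst ht
      by_cases h3 : streak + 1 ≥ 3
      · have hs : streak = 2 := by omega
        subst hs
        rw [pvStreakLoopA_cons, if_pos h, if_pos (by norm_num)]
        rw [show (2 : Int).toNat = 2 from rfl, pvConsRun_consRun]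
        exact (pvWarnOf_consRun_big t 3 (pvRunsRec ts) (le_refl _)).symm
      · have hs : streak = 1 := by omega
        subst hs
        rw [pvStreakLoopA_cons, if_pos h, if_neg (by norm_num),
          show (1 : Int) + 1 = 2 from rfl]
        rw [ih t 2 (by norm_num) (by norm_num)]
        rw [show (1 : Int).toNat = 1 from rfl, show (2 : Int).toNat = 2 from rfl,
          pvConsRun_consRun]
    · rw [pvStreakLoopA_cons, if_neg h]
      rw [ih t 1 (by norm_num) (by norm_num), show (1 : Int).toNat = 1 from rfl]
      obtain ⟨c', rs', heq, -⟩ := pvConsRun_head t 1 (pvRunsRec ts)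
      have hne : ¬ (prev == t) := fun hc => h (by rw [eq_of_beq hc]; exact beq_self_eq_true t)
      have hlt : ¬ (3 ≤ streak.toNat) := by omega
      rw [heq,
        show pvConsRun prev streak.toNat ((t, c') :: rs')
            = (prev, streak.toNat) :: (t, c') :: rs' from by
          simp only [pvConsRun]; rw [if_neg hne]]
      unfold pvWarnOf
      rw [List.find?_cons_of_neg (a := (prev, streak.toNat)) (by simpa using hlt)]

lemma pvStreak_eq_runs (types : List (Option String)) :
    (match types with
     | [] => []
     | t :: rest => pvStreakLoopA t rest 1)
    = (match (pvRunsB types).find? (fun r => 3 ≤ r.2) with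
       | some (k, _) => [pvRepeatMsg k]
       | none => []) := by
  rw [pvRunsB_eq]
  cases types with
  | nil => rfl
  | cons t rest =>
    show pvStreakLoopA t rest 1 = _
    rw [pvStreakLoopA_eq rest t 1 (by norm_num) (by norm_num)]
    rw [show pvRunsRec (t :: rest) = pvConsRun t 1 (pvRunsRec rest) from rfl]
    rfl

-- ===== VERDICT (by name: the statement is the Claim_ definition above) =====
theorem check_slide_diversity_spec : Claim_equal_check_slide_diversity := by
  intro spec _
  show check_slide_diversity spec = check_slide_diversity_alt spec
  unfold check_slide_diversity check_slide_diversity_alt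
  exact congrArg _ (pvStreak_eq_runs _)
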